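-- pv_equiv track=rewrite | github.com/YoussefM890/problem_solving | leetcode/Medium/547. Number of Provinces.py | func
-- ===== SOURCE A (Python) =====
-- def func(grid):
--     visited = set()
--     ones = 0
--     n = len(grid)
--     m = len(grid[0])
--     # l = [[1 if i == 0 or i == n - 1 or j == 0 or j == n - 1 else 0 for j in range(n)] for i in range(n)]
--     def explore(i, j):
--         if (i, j) in visited or i not in range(0, n) or j not in range(0, m) or grid[i][j] == 0:
--             return
--         else:
--             visited.add((i, j))
--         explore(i + 1, j)
--         explore(i - 1, j)
--         explore(i, j + 1)
--         explore(i, j - 1)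
--
--     for i in range(n):
--         for j in range(m):
--             if grid[i][j] == 1 :
--                 ones += 1
--                 if (i in [0,n-1] or  j in [0,m-1]):
--                     explore(i , j)
--     return ones - len(visited)
-- ===== SOURCE B (Python) =====
-- def func(grid):
--     n = len(grid)
--     m = len(grid[0])
--     visited = set()
--     ones = 0
--     for i in range(n):
--         for j in range(m):
--             if grid[i][j] == 1:
--                 ones += 1
--                 if i in [0, n - 1] or j in [0, m - 1]:
--                     # explicit stack-based flood fill instead of recursion
--                     stack = [(i, j)]
--                     while stack:
--                         a, b = stack.pop()
--                         if (a, b) in visited or not (0 <= a < n) or not (0 <= b < m) or grid[a][b] == 0: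
--                             continue
--                         visited.add((a, b))
--                         stack.extend([(a, b - 1), (a, b + 1), (a - 1, b), (a + 1, b)])
--     return ones - len(visited)
-- ===== Notes on version B (the rewrite author's own statement) =====
-- stated objective: alternative
-- what changed: A's recursive depth-first explore is replaced by an explicit stack-based flood fill (iterative worklist loop); the counting double loop is kept.
import Mathlib
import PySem

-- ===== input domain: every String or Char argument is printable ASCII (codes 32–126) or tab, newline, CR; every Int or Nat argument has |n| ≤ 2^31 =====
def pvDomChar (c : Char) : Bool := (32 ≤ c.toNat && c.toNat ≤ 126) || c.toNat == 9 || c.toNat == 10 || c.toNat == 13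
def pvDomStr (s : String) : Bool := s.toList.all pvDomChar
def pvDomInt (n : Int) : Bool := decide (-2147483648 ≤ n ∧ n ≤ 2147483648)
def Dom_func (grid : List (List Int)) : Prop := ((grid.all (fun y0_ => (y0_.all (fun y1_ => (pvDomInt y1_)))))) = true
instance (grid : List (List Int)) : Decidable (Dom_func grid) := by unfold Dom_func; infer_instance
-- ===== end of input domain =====

-- B replaces A's recursive flood fill by an explicit stack-based one (alternative decomposition, same cost).

-- ===== PORT A =====
-- grid[i][j]; the .getD defaults are only reachable outside Pre_func (Python raises IndexError there).
def pvVal (grid : List (List Int)) (i j : Int) : Int :=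
  (PySem.List.pyGet? ((PySem.List.pyGet? grid i).getD []) j).getD 0

-- the guard '(i, j) in visited or i not in range(0, n) or j not in range(0, m) or grid[i][j] == 0',
-- identical in Source A's explore and in Source B's while loop
def pvSkip (grid : List (List Int)) (n m : Int) (v : PySem.Set (Int × Int)) (i j : Int) : Bool :=
  PySem.Set.contains v (i, j) || !(decide (0 ≤ i) && decide (i < n)) ||
    !(decide (0 ≤ j) && decide (j < m)) || (pvVal grid i j == 0)

-- A's recursive 'explore', ported with a fuel parameter; the caller passes (number of grid cells)+1,
-- which is provably sufficient: each recursion level first adds a fresh in-bounds cell to visited.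
def explore (grid : List (List Int)) (n m : Int) : Nat → Int → Int → PySem.Set (Int × Int) → PySem.Set (Int × Int)
  | 0, _, _, v => v
  | Nat.succ k, i, j, v =>
    if pvSkip grid n m v i j then v
    else
      let v0 := PySem.Set.add v (i, j)
      let v1 := explore grid n m k (i + 1) j v0
      let v2 := explore grid n m k (i - 1) j v1
      let v3 := explore grid n m k i (j + 1) v2
      explore grid n m k i (j - 1) v3

-- the in-bounds cells [(i, j) for i in range(n) for j in range(m)]
def pvCells (n m : Int) : List (Int × Int) :=
  (PySem.List.pyRange 0 n).flatMap (fun i => (PySem.List.pyRange 0 m).map (fun j => (i, j)))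

def func (grid : List (List Int)) : Int :=
  let n : Int := (grid.length : Int)
  let m : Int := (((PySem.List.pyGet? grid 0).getD []).length : Int)
  let st :=
    (PySem.List.pyRange 0 n).foldl (fun st i =>
      (PySem.List.pyRange 0 m).foldl (fun st j =>
        if pvVal grid i j == 1 then
          if i == 0 || i == n - 1 || j == 0 || j == m - 1 then
            (st.1 + 1, explore grid n m ((pvCells n m).length + 1) i j st.2)
          else (st.1 + 1, st.2)
        else st) st)
      ((0 : Int), (PySem.Set.empty : PySem.Set (Int × Int)))
  st.1 - PySem.Set.len st.2

-- ===== PORT B =====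
-- the number of in-bounds cells not yet visited: the termination measure of B's while loop
def pvUnv (n m : Int) (v : PySem.Set (Int × Int)) : Nat :=
  ((pvCells n m).filter (fun c => !(PySem.Set.contains v c))).length

-- the components of a false guard (used by dfsLoop's termination argument)
lemma pvContains_false_iff (v : PySem.Set (Int × Int)) (x : Int × Int) :
    PySem.Set.contains v x = false ↔ x ∉ v := by
  constructor
  · intro hf hm
    rw [(PySem.Set.contains_iff v x).mpr hm] at hf
    exact Bool.noConfusion hf
  · intro hnm
    rcases h : PySem.Set.contains v x with _ | _
    · rfl
    · exact absurd ((PySem.Set.contains_iff v x).mp h) hnm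

lemma pvSkip_false (grid : List (List Int)) (n m : Int) (v : PySem.Set (Int × Int)) (i j : Int)
    (h : pvSkip grid n m v i j = false) :
    0 ≤ i ∧ i < n ∧ 0 ≤ j ∧ j < m ∧ (i, j) ∉ v := by
  simp only [pvSkip, Bool.or_eq_false_iff, Bool.not_eq_false', Bool.and_eq_true,
    decide_eq_true_eq] at h
  obtain ⟨⟨⟨hc, hi⟩, hj⟩, -⟩ := h
  exact ⟨hi.1, hi.2, hj.1, hj.2, (pvContains_false_iff v (i, j)).mp hc⟩

lemma pvFilter_length_lt {α : Type} (p q : α → Bool) (himp : ∀ x, q x = true → p x = true) :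
    ∀ (l : List α) (c : α), c ∈ l → p c = true → q c = false →
      (l.filter q).length < (l.filter p).length := by
  intro l
  induction l with
  | nil => intro c hc _ _; cases hc
  | cons a t ih =>
    intro c hc hp hq
    have hle : (t.filter q).length ≤ (t.filter p).length := by
      simp only [← List.countP_eq_length_filter]
      exact List.countP_mono_left (fun x _ hx => himp x hx)
    rcases List.mem_cons.mp hc with rfl | hct
    · simp only [List.filter_cons, hp, hq, Bool.false_eq_true, if_true, if_false,
        List.length_cons]
      omega
    · have hlt := ih c hct hp hq
      by_cases ha : q a
      · have hpa := himp a ha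
        simp only [List.filter_cons, hpa, ha, if_true, List.length_cons]
        omega
      · cases hpa : p a <;>
          simp only [List.filter_cons, hpa, Bool.eq_false_iff.mpr ha, Bool.false_eq_true,
            if_true, if_false, List.length_cons] <;> omega

lemma pvMem_pvCells (n m i j : Int) :
    (i, j) ∈ pvCells n m ↔ (0 ≤ i ∧ i < n) ∧ (0 ≤ j ∧ j < m) := by
  simp only [pvCells, List.mem_flatMap, List.mem_map, PySem.List.mem_pyRange_one, Prod.mk.injEq]
  constructor
  · rintro ⟨a, ha, b, hb, rfl, rfl⟩; exact ⟨ha, hb⟩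
  · rintro ⟨hi, hj⟩; exact ⟨i, hi, j, hj, rfl, rfl⟩

lemma pvUnv_add_lt (n m : Int) (v : PySem.Set (Int × Int)) (i j : Int)
    (h1 : 0 ≤ i) (h2 : i < n) (h3 : 0 ≤ j) (h4 : j < m) (h5 : (i, j) ∉ v) :
    pvUnv n m (PySem.Set.add v (i, j)) < pvUnv n m v := by
  simp only [pvUnv]
  have himp : ∀ x, (!PySem.Set.contains (PySem.Set.add v (i, j)) x) = true →
      (!PySem.Set.contains v x) = true := by
    intro x hx
    simp only [Bool.not_eq_true'] at hx ⊢
    exact (pvContains_false_iff v x).mpr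
      (fun hm => (pvContains_false_iff _ x).mp hx ((PySem.Set.mem_add _ _ _).mpr (Or.inl hm)))
  have hc : (i, j) ∈ pvCells n m := (pvMem_pvCells n m i j).mpr ⟨⟨h1, h2⟩, ⟨h3, h4⟩⟩
  have hp : (!PySem.Set.contains v (i, j)) = true := by
    simp only [Bool.not_eq_true']
    exact (pvContains_false_iff v (i, j)).mpr h5
  have hq : (!PySem.Set.contains (PySem.Set.add v (i, j)) (i, j)) = false := by
    simp only [Bool.not_eq_false']
    exact (PySem.Set.contains_iff _ (i, j)).mpr ((PySem.Set.mem_add _ _ _).mpr (Or.inr rfl))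
  exact pvFilter_length_lt _ _ himp (pvCells n m) (i, j) hc hp hq

-- B's 'while stack:' loop.  The Python stack grows/pops at the END of the list; it is represented
-- here REVERSED (top of stack = head), so '(a, b) = stack.pop()' = take the head and
-- 'stack.extend([(a,b-1),(a,b+1),(a-1,b),(a+1,b)])' = prepend those four cells in reverse order.
def dfsLoop (grid : List (List Int)) (n m : Int) : List (Int × Int) → PySem.Set (Int × Int) → PySem.Set (Int × Int)
  | [], v => v
  | c :: s, v =>
    if h : pvSkip grid n m v c.1 c.2 then dfsLoop grid n m s v
    else dfsLoop grid n m ((c.1 + 1, c.2) :: (c.1 - 1, c.2) :: (c.1, c.2 + 1) :: (c.1, c.2 - 1) :: s)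
          (PySem.Set.add v (c.1, c.2))
  termination_by s v => (pvUnv n m v, s.length)
  decreasing_by
  · apply Prod.Lex.right
    simp
  · apply Prod.Lex.left
    have hb := pvSkip_false grid n m v c.1 c.2 (Bool.eq_false_iff.mpr h)
    exact pvUnv_add_lt n m v c.1 c.2 hb.1 hb.2.1 hb.2.2.1 hb.2.2.2.1 hb.2.2.2.2

def func_alt (grid : List (List Int)) : Int :=
  let n : Int := (grid.length : Int)
  let m : Int := (((PySem.List.pyGet? grid 0).getD []).length : Int)
  let st :=
    (PySem.List.pyRange 0 n).foldl (fun st i =>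
      (PySem.List.pyRange 0 m).foldl (fun st j =>
        if pvVal grid i j == 1 then
          if i == 0 || i == n - 1 || j == 0 || j == m - 1 then
            (st.1 + 1, dfsLoop grid n m [(i, j)] st.2)
          else (st.1 + 1, st.2)
        else st) st)
      ((0 : Int), (PySem.Set.empty : PySem.Set (Int × Int)))
  st.1 - PySem.Set.len st.2

-- ===== PRECONDITION & SPEC =====
-- Pre_func excludes exactly the inputs where A raises IndexError: the empty grid (len(grid[0]))
-- and grids in which some row is shorter than the first row (grid[i][j] for j < len(grid[0])).
def Pre_func (grid : List (List Int)) : Prop :=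
  grid ≠ [] ∧ ∀ row ∈ grid, (grid.head?.getD []).length ≤ row.length
instance (grid : List (List Int)) : Decidable (Pre_func grid) := by unfold Pre_func; infer_instance

def pvWitness_func : List (List Int) := [[1, 0], [0, 1]]

def Spec_func (grid : List (List Int)) (out : Int) : Prop := out = func_alt grid
instance (grid : List (List Int)) (out : Int) : Decidable (Spec_func grid out) := by unfold Spec_func; infer_instance

-- ===== CLAIM (what is proved, stated in full; the proofs are below) =====
def Claim_equal_func : Prop := ∀ (grid : List (List Int)), Dom_func grid → Pre_func grid → Spec_func grid (func grid)

-- ===== LEMMAS AND PROOFS =====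

lemma mem_dfsLoop (grid : List (List Int)) (n m : Int) (s : List (Int × Int))
    (v : PySem.Set (Int × Int)) (x : Int × Int) (hx : x ∈ v) : x ∈ dfsLoop grid n m s v := by
  induction s, v using dfsLoop.induct grid n m with
  | case1 v => rw [dfsLoop]; exact hx
  | case2 c s v h ih => rw [dfsLoop, dif_pos h]; exact ih hx
  | case3 c s v h ih =>
    rw [dfsLoop, dif_neg h]
    exact ih ((PySem.Set.mem_add _ _ _).mpr (Or.inl hx))

lemma pvUnv_mono (n m : Int) (v w : PySem.Set (Int × Int)) (h : ∀ x ∈ v, x ∈ w) :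
    pvUnv n m w ≤ pvUnv n m v := by
  simp only [pvUnv, ← List.countP_eq_length_filter]
  apply List.countP_mono_left
  intro x _ hx
  simp only [Bool.not_eq_true'] at hx ⊢
  exact (pvContains_false_iff v x).mpr (fun hm => (pvContains_false_iff w x).mp hx (h x hm))

lemma dfsLoop_append (grid : List (List Int)) (n m : Int) (s₁ s₂ : List (Int × Int))
    (v : PySem.Set (Int × Int)) :
    dfsLoop grid n m (s₁ ++ s₂) v = dfsLoop grid n m s₂ (dfsLoop grid n m s₁ v) := by
  induction s₁, v using dfsLoop.induct grid n m with
  | case1 v => rw [List.nil_append, dfsLoop]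
  | case2 c s v h ih =>
    rw [List.cons_append, dfsLoop, dif_pos h, ih]
    conv_rhs => rw [dfsLoop, dif_pos h]
  | case3 c s v h ih =>
    rw [List.cons_append, dfsLoop, dif_neg h]
    rw [show ((c.1 + 1, c.2) :: (c.1 - 1, c.2) :: (c.1, c.2 + 1) :: (c.1, c.2 - 1) :: (s ++ s₂))
        = (((c.1 + 1, c.2) :: (c.1 - 1, c.2) :: (c.1, c.2 + 1) :: (c.1, c.2 - 1) :: s) ++ s₂) from rfl]
    rw [ih]
    conv_rhs => rw [dfsLoop, dif_neg h]

lemma explore_eq_dfsLoop (grid : List (List Int)) (n m : Int) :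
    ∀ (k : Nat) (i j : Int) (v : PySem.Set (Int × Int)), pvUnv n m v ≤ k →
      explore grid n m (k + 1) i j v = dfsLoop grid n m [(i, j)] v := by
  intro k
  induction k with
  | zero =>
    intro i j v hv
    by_cases h : pvSkip grid n m v i j
    · rw [explore, if_pos h, dfsLoop, dif_pos h, dfsLoop]
    · exfalso
      obtain ⟨h1, h2, h3, h4, h5⟩ := pvSkip_false grid n m v i j (Bool.eq_false_iff.mpr h)
      have hmem : (i, j) ∈ (pvCells n m).filter (fun c => !(PySem.Set.contains v c)) := by
        apply List.mem_filter.mpr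
        refine ⟨(pvMem_pvCells n m i j).mpr ⟨⟨h1, h2⟩, ⟨h3, h4⟩⟩, ?_⟩
        simp only [Bool.not_eq_true']
        exact (pvContains_false_iff v (i, j)).mpr h5
      have := List.length_pos_of_mem hmem
      simp only [pvUnv] at hv
      omega
  | succ k ih =>
    intro i j v hv
    by_cases h : pvSkip grid n m v i j
    · rw [explore, if_pos h, dfsLoop, dif_pos h, dfsLoop]
    · have hb := pvSkip_false grid n m v i j (Bool.eq_false_iff.mpr h)
      have hR : dfsLoop grid n m [(i, j)] v
          = dfsLoop grid n m [(i, j - 1)] (dfsLoop grid n m [(i, j + 1)]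
              (dfsLoop grid n m [(i - 1, j)] (dfsLoop grid n m [(i + 1, j)]
                (PySem.Set.add v (i, j))))) := by
        rw [dfsLoop, dif_neg h]
        rw [show ((i + 1, j) :: (i - 1, j) :: (i, j + 1) :: (i, j - 1) :: ([] : List (Int × Int)))
            = [(i + 1, j)] ++ ([(i - 1, j)] ++ ([(i, j + 1)] ++ [(i, j - 1)])) from rfl]
        rw [dfsLoop_append, dfsLoop_append, dfsLoop_append]
      rw [explore, if_neg h, hR]
      show explore grid n m (k + 1) i (j - 1) (explore grid n m (k + 1) i (j + 1)
          (explore grid n m (k + 1) (i - 1) j (explore grid n m (k + 1) (i + 1) j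
            (PySem.Set.add v (i, j))))) = _
      have hk0 : pvUnv n m (PySem.Set.add v (i, j)) ≤ k := by
        have := pvUnv_add_lt n m v i j hb.1 hb.2.1 hb.2.2.1 hb.2.2.2.1 hb.2.2.2.2
        omega
      rw [ih (i + 1) j _ hk0]
      have hm1 : pvUnv n m (dfsLoop grid n m [(i + 1, j)] (PySem.Set.add v (i, j))) ≤ k :=
        le_trans (pvUnv_mono n m _ _ (fun x hx => mem_dfsLoop grid n m _ _ x hx)) hk0
      rw [ih (i - 1) j _ hm1]
      have hm2 : pvUnv n m (dfsLoop grid n m [(i - 1, j)]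
          (dfsLoop grid n m [(i + 1, j)] (PySem.Set.add v (i, j)))) ≤ k :=
        le_trans (pvUnv_mono n m _ _ (fun x hx => mem_dfsLoop grid n m _ _ x hx)) hm1
      rw [ih i (j + 1) _ hm2]
      have hm3 : pvUnv n m (dfsLoop grid n m [(i, j + 1)] (dfsLoop grid n m [(i - 1, j)]
          (dfsLoop grid n m [(i + 1, j)] (PySem.Set.add v (i, j))))) ≤ k :=
        le_trans (pvUnv_mono n m _ _ (fun x hx => mem_dfsLoop grid n m _ _ x hx)) hm2
      rw [ih i (j - 1) _ hm3]

lemma pvUnv_le_cells (n m : Int) (v : PySem.Set (Int × Int)) :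
    pvUnv n m v ≤ (pvCells n m).length :=
  List.length_filter_le _ _

lemma func_eq_func_alt (grid : List (List Int)) : func grid = func_alt grid := by
  unfold func func_alt
  have h : ∀ (i j : Int) (v : PySem.Set (Int × Int)),
      explore grid (grid.length : Int) (((PySem.List.pyGet? grid 0).getD []).length : Int)
        ((pvCells (grid.length : Int) (((PySem.List.pyGet? grid 0).getD []).length : Int)).length + 1) i j v
      = dfsLoop grid (grid.length : Int) (((PySem.List.pyGet? grid 0).getD []).length : Int) [(i, j)] v := by
    intro i j v
    exact explore_eq_dfsLoop _ _ _ _ i j v (pvUnv_le_cells _ _ v)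
  simp only [h]

-- ===== VERDICT (by name: the statement is the Claim_ definition above) =====
theorem func_spec : Claim_equal_func := by
  intro grid _ _
  unfold Spec_func
  exact func_eq_func_alt grid
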